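-- pv_equiv track=rewrite | github.com/PavelD1989/PavelDubouski_QAP12-onl_MAIN | HW_4/for_func_8.py | integer_operations
-- ===== SOURCE A (Python) =====
-- def integer_operations(list_integers_numbers: list):
--     multiplication_of_positive_num = 1
--     sum_of_negative_num = 0
--     count_of_negative_num = 0
--
--     for i in range(len(list_integers_numbers)):
--         if list_integers_numbers[i] > 0:
--             multiplication_of_positive_num *= list_integers_numbers[i]
--         else:
--             sum_of_negative_num += list_integers_numbers[i]
--             count_of_negative_num += 1
--     return multiplication_of_positive_num, sum_of_negative_num, count_of_negative_num
-- ===== SOURCE B (Python) =====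
-- def integer_operations(list_integers_numbers: list):
--     # Sort first: after sorting, the nonpositives form a prefix and the
--     # positives a suffix; product/sum/count are order-independent, so this
--     # computes the same result as any traversal order.
--     s = sorted(list_integers_numbers)
--     k = 0
--     while k < len(s) and s[k] <= 0:
--         k += 1
--     product = 1
--     for x in s[k:]:
--         product *= x
--     return product, sum(s[:k]), k
-- ===== Notes on version B (the rewrite author's own statement) =====
-- stated objective: alternative
-- what changed: Sort-then-split instead of a fused accumulator loop: B sorts the list, advances a cursor past the leading nonpositive prefix, and reduces prefix (sum, count) and suffix (product) separately; correct because product, sum and count are invariant under reordering.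
import Mathlib
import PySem

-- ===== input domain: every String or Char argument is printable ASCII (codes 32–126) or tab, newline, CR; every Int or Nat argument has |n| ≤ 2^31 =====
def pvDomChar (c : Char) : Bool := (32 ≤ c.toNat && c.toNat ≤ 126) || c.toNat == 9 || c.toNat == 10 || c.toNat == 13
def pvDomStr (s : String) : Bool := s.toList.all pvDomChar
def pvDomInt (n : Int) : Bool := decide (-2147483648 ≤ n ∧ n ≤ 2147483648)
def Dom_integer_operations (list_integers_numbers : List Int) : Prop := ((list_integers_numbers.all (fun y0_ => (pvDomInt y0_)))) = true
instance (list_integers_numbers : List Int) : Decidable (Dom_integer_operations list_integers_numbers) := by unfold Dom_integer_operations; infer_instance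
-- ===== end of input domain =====

-- B sorts the list and splits it into the nonpositive prefix and positive suffix,
-- reducing each separately, instead of A's single fused accumulator loop (alternative; O(n log n)).


-- ===== PORT A =====
-- literal transliteration: for i in range(len(xs)) over a (product, sum, count) accumulator
def integer_operations (list_integers_numbers : List Int) : Int × Int × Int :=
  (PySem.List.pyRange 0 (list_integers_numbers.length : Int) 1).foldl
    (fun acc i =>
      let v := PySem.List.pyGetD list_integers_numbers i 0
      if v > 0 then (acc.1 * v, acc.2.1, acc.2.2)
      else (acc.1, acc.2.1 + v, acc.2.2 + 1))
    (1, 0, 0)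

-- ===== PORT B =====
-- s = sorted(xs); the while loop advancing k over the leading nonpositives is the
-- length of the nonpositive prefix (takeWhile); s[k:] / s[:k] with 0 ≤ k ≤ len are drop/take.
def integer_operations_alt (list_integers_numbers : List Int) : Int × Int × Int :=
  let s := PySem.List.sorted list_integers_numbers (fun x => x) false
  let k := (s.takeWhile (fun x => decide (x ≤ 0))).length
  ((s.drop k).foldl (fun acc x => acc * x) 1, (s.take k).sum, (k : Int))

-- ===== PRECONDITION & SPEC =====
def Spec_integer_operations (list_integers_numbers : List Int) (out : Int × Int × Int) : Prop := out = integer_operations_alt list_integers_numbers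
instance (list_integers_numbers : List Int) (out : Int × Int × Int) : Decidable (Spec_integer_operations list_integers_numbers out) := by unfold Spec_integer_operations; infer_instance

-- ===== CLAIM =====
def Claim_equal_integer_operations : Prop := ∀ (list_integers_numbers : List Int), Dom_integer_operations list_integers_numbers → Spec_integer_operations list_integers_numbers (integer_operations list_integers_numbers)

-- ===== LEMMAS AND PROOFS =====

theorem foldl_mul_init (l : List Int) (a : Int) :
    l.foldl (fun acc x => acc * x) a = a * l.foldl (fun acc x => acc * x) 1 := by
  induction l generalizing a with
  | nil => simp
  | cons y l ih =>
      simp only [List.foldl_cons]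
      rw [ih (a * y), ih (1 * y)]
      ring

theorem foldl_mul_eq_prod (l : List Int) :
    l.foldl (fun acc x => acc * x) 1 = l.prod := by
  induction l with
  | nil => simp
  | cons y l ih => rw [List.foldl_cons, foldl_mul_init, ih]; simp [List.prod_cons]

-- A's fused loop over the raw list equals the three filter-based reductions
theorem fused_loop_eq (xs : List Int) (p s c : Int) :
    xs.foldl
      (fun acc v =>
        if v > 0 then (acc.1 * v, acc.2.1, acc.2.2)
        else (acc.1, acc.2.1 + v, acc.2.2 + 1))
      (p, s, c)
    = (p * (xs.filter (fun x => x > 0)).prod,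
       s + (xs.filter (fun x => x ≤ 0)).sum,
       c + ((xs.filter (fun x => x ≤ 0)).length : Int)) := by
  induction xs generalizing p s c with
  | nil => simp
  | cons y xs ih =>
      simp only [List.foldl_cons, List.filter_cons, decide_eq_true_eq]
      by_cases hy : y > 0
      · have hy' : ¬ y ≤ 0 := by omega
        rw [if_pos hy, if_pos hy, if_neg hy', ih]
        simp only [List.prod_cons]
        exact congrArg₂ Prod.mk (by ring) rfl
      · have hy' : y ≤ 0 := by omega
        rw [if_neg hy, if_neg hy, if_pos hy', ih]
        simp only [List.sum_cons, List.length_cons]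
        exact congrArg₂ Prod.mk rfl (congrArg₂ Prod.mk (by ring) (by push_cast; ring))

-- on a (≤)-sorted list, the nonpositive prefix IS the filter of nonpositives
theorem takeWhile_eq_filter_of_sorted (s : List Int) (hs : s.Pairwise (· ≤ ·)) :
    s.takeWhile (fun x => decide (x ≤ 0)) = s.filter (fun x => decide (x ≤ 0)) := by
  induction s with
  | nil => rfl
  | cons y t ih =>
      rcases List.pairwise_cons.mp hs with ⟨hy, ht⟩
      by_cases h : y ≤ 0
      · rw [List.takeWhile_cons_of_pos (by simpa using h),
            List.filter_cons_of_pos (by simpa using h), ih ht]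
      · rw [List.takeWhile_cons_of_neg (by simpa using h),
            List.filter_cons_of_neg (by simpa using h),
            List.filter_eq_nil_iff.mpr
              (by intro x hx; have := hy x hx; simp; omega)]

-- and the rest is the filter of positives
theorem dropTakeWhile_eq_filter_of_sorted (s : List Int) (hs : s.Pairwise (· ≤ ·)) :
    s.drop (s.takeWhile (fun x => decide (x ≤ 0))).length
      = s.filter (fun x => decide (x > 0)) := by
  induction s with
  | nil => rfl
  | cons y t ih =>
      rcases List.pairwise_cons.mp hs with ⟨hy, ht⟩
      by_cases h : y ≤ 0
      · rw [List.takeWhile_cons_of_pos (by simpa using h), List.length_cons,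
            List.drop_succ_cons, ih ht,
            List.filter_cons_of_neg (by simp; omega)]
      · rw [List.takeWhile_cons_of_neg (by simpa using h), List.length_nil, List.drop_zero,
            List.filter_cons_of_pos (by simp; omega),
            List.filter_eq_self.mpr
              (by intro x hx; have := hy x hx; simp; omega)]

theorem integer_operations_eq_alt (xs : List Int) :
    integer_operations xs = integer_operations_alt xs := by
  simp only [integer_operations, integer_operations_alt]
  rw [PySem.List.foldl_pyRange_zero_pyGetD' xs 0
      (fun acc v =>
        if v > 0 then (acc.1 * v, acc.2.1, acc.2.2)
        else (acc.1, acc.2.1 + v, acc.2.2 + 1)) (1, 0, 0)]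
  rw [fused_loop_eq]
  set s := PySem.List.sorted xs (fun x => x) false with hsdef
  have hperm : s.Perm xs := PySem.List.sorted_perm xs (fun x => x) false
  have hpw : s.Pairwise (· ≤ ·) := by
    simpa using PySem.List.sorted_pairwise (κ := Int) xs (fun x => x)
  have htk := takeWhile_eq_filter_of_sorted s hpw
  have hdr := dropTakeWhile_eq_filter_of_sorted s hpw
  have hple : (s.filter (fun x => decide (x ≤ 0))).Perm (xs.filter (fun x => decide (x ≤ 0))) :=
    hperm.filter _
  have hpgt : (s.filter (fun x => decide (x > 0))).Perm (xs.filter (fun x => decide (x > 0))) :=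
    hperm.filter _
  rw [hdr, foldl_mul_eq_prod, hpgt.prod_eq,
      ← List.prefix_iff_eq_take.mp (List.takeWhile_prefix _),
      htk, hple.sum_eq, hple.length_eq]
  simp

-- ===== VERDICT =====
theorem integer_operations_spec : Claim_equal_integer_operations := by
  intro xs _
  unfold Spec_integer_operations
  exact integer_operations_eq_alt xs
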